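-- pv_equiv track=rewrite | github.com/Crazy-Ginger/Python | University/Software1/SamplePaper/ClosedExamination/question_1.py | to_barcode
-- ===== SOURCE A (Python) =====
-- def to_barcode(binary):
--     printer = ""
--     for i in binary:
--         if i == "1":
--             printer += "|"
--         elif i == "0":
--             printer += "."
--         else:
--             return None
--     return printer
-- ===== SOURCE B (Python) =====
-- def to_barcode(binary):
--     for i in binary:
--         if i not in {"0", "1"}:
--             return None
--     return "".join("|" if i == "1" else "." for i in binary)
-- ===== Notes on version B (the rewrite author's own statement) =====
-- stated objective: idiomatic
-- what changed: B replaces A's single accumulating loop with a validation scan followed by a join over a comprehension mapping 1->| and 0->.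
import Mathlib
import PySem

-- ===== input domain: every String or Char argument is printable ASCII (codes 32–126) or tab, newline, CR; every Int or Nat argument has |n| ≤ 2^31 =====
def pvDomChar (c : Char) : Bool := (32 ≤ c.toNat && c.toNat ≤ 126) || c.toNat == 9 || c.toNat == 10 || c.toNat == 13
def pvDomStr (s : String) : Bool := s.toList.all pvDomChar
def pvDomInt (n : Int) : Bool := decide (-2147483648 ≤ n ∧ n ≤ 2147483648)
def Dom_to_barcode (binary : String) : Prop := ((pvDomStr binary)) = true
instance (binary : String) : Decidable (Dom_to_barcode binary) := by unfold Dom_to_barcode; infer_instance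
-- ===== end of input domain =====

-- B replaces A's accumulating early-return loop by a validation pass plus a join over a mapping comprehension (idiomatic; same behaviour).


-- ===== PORT A =====
-- loop with accumulator and early return None on invalid characters
def toBarcodeAux : List Char → String → Option String
  | [], printer => some printer
  | i :: rest, printer =>
    if i = '1' then toBarcodeAux rest (printer ++ "|")
    else if i = '0' then toBarcodeAux rest (printer ++ ".")
    else none

def to_barcode (binary : String) : Option String :=
  toBarcodeAux binary.toList ""

-- ===== PORT B =====
-- B: validation pass, then a join over a mapping comprehension
def to_barcode_alt (binary : String) : Option String :=
  if binary.toList.all (fun i => i == '0' || i == '1') then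
    some (String.ofList (binary.toList.map (fun i => if i = '1' then '|' else '.')))
  else none

-- ===== PRECONDITION & SPEC =====
def Spec_to_barcode (binary : String) (out : Option String) : Prop := out = to_barcode_alt binary
instance (binary : String) (out : Option String) : Decidable (Spec_to_barcode binary out) := by unfold Spec_to_barcode; infer_instance

-- ===== CLAIM (what is proved, stated in full; the proofs are below) =====
def Claim_equal_to_barcode : Prop := ∀ (binary : String), Dom_to_barcode binary → Spec_to_barcode binary (to_barcode binary)

-- ===== LEMMAS AND PROOFS =====

-- ===== VERDICT (by name: the statement is the Claim_ definition above) =====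
lemma toBarcodeAux_eq (l : List Char) (acc : String) :
    toBarcodeAux l acc =
      if l.all (fun i => i == '0' || i == '1') then
        some (acc ++ String.ofList (l.map fun i => if i = '1' then '|' else '.'))
      else none := by
  induction l generalizing acc with
  | nil => simp [toBarcodeAux]
  | cons c rest ih =>
    by_cases h1 : c = '1'
    · subst h1
      simp [toBarcodeAux, ih, List.all_cons]
      split_ifs with h
      · apply congrArg
        apply String.ext
        simp [String.toList_append, String.toList_ofList]
      · rfl
    · by_cases h0 : c = '0'
      · subst h0
        simp [toBarcodeAux, ih, List.all_cons]
        split_ifs with h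
        · apply congrArg
          apply String.ext
          simp [String.toList_append, String.toList_ofList]
        · rfl
      · have hall : (c :: rest).all (fun i => i == '0' || i == '1') = false := by
          simp [List.all_cons, h1, h0]
        simp [toBarcodeAux, h1, h0, hall]

theorem to_barcode_spec : Claim_equal_to_barcode := by
  intro binary _
  unfold Spec_to_barcode to_barcode to_barcode_alt
  rw [toBarcodeAux_eq]
  split_ifs with h
  · apply congrArg
    apply String.ext
    simp [String.toList_ofList]
  · rfl
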